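-- pv_equiv track=rewrite | github.com/milu-buet/Competitive-Programming | Interview/problems/String/rabin-karp.py | check
-- ===== SOURCE A (Python) =====
-- def check(m, S, MOD):
--
--     h = 0
--     for i in range(m):
--         h = ( h*26 + S[i] ) % MOD
--
--     dp = set([h])
--     aL = 26**m % MOD
--     for i in range(1, len(S)-m+1):  # 01234 5-2=3
--
--         h =  ( h*26 - S[i-1]*aL + S[i+m-1] ) %MOD
--
--         if h in dp:
--             return i
--         else:
--             dp.add(h)
--
--     return -1
-- ===== SOURCE B (Python) =====
-- def check(m, S, MOD):
--     def whash(i):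
--         h = 0
--         for j in range(i, i + m):
--             h = (h * 26 + S[j]) % MOD
--         return h
--     seen = {whash(0)}
--     for i in range(1, len(S) - m + 1):
--         h = whash(i)
--         if h in seen:
--             return i
--         seen.add(h)
--     return -1
-- ===== Notes on version B (the rewrite author's own statement) =====
-- stated objective: alternative
-- what changed: Replaces A's O(1) rolling-hash update (and its precomputed 26**m factor) by recomputing each window's base-26 hash from scratch with an inner loop, keeping the same modulus and the same set of seen hashes so every collision index coincides.
-- outside the precondition, e.g. on check(-1, [16, 0], 1): A returns 2, B returns 1; on check(2, [1, 2], 0): A raises ZeroDivisionError, B raises ZeroDivisionError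
import Mathlib
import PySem

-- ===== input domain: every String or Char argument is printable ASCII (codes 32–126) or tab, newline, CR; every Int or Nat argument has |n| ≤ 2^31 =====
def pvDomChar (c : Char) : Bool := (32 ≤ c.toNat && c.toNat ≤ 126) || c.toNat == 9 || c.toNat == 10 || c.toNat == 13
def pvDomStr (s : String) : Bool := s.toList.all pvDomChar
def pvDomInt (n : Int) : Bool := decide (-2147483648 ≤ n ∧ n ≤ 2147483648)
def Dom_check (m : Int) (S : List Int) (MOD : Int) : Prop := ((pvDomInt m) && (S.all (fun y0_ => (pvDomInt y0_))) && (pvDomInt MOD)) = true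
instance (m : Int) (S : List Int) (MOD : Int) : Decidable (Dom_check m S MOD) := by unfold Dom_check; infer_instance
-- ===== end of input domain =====

-- B replaces A's O(1) rolling-hash update by a from-scratch recomputation of each
-- window's hash (same base 26 and same modulus, so all hash collisions coincide):
-- an alternative traversal, not a speed claim.

-- ===== PORT A =====
-- main loop: 'for i in range(1, len(S)-m+1)' carrying h and the set dp, early return on hit
def checkGo (S : List Int) (MOD aL m : Int) (h : Int) (dp : PySem.Set Int) : List Int → Int
  | [] => -1
  | i :: rest =>
      let h' := PySem.Int.mod (h * 26 - (PySem.List.pyGetD S (i - 1) 0) * aL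
                                + PySem.List.pyGetD S (i + m - 1) 0) MOD
      if PySem.Set.contains dp h' then i
      else checkGo S MOD aL m h' (PySem.Set.add dp h') rest

def check (m : Int) (S : List Int) (MOD : Int) : Int :=
  -- first loop: h = (h*26 + S[i]) % MOD for i in range(m); indices in range under Pre_
  let h := (PySem.List.pyRange 0 m 1).foldl
             (fun h i => PySem.Int.mod (h * 26 + PySem.List.pyGetD S i 0) MOD) 0
  let dp := PySem.Set.ofList [h]
  -- aL = 26**m % MOD; under Pre_ (0 ≤ m) the exponent m.toNat is exactly m
  let aL := PySem.Int.mod (26 ^ m.toNat) MOD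
  checkGo S MOD aL m h dp (PySem.List.pyRange 1 (PySem.List.len S - m + 1) 1)

-- ===== PORT B =====
-- whash(i): the hash of window S[i .. i+m) recomputed from scratch
def altHash (S : List Int) (MOD m i : Int) : Int :=
  (PySem.List.pyRange i (i + m) 1).foldl
    (fun h j => PySem.Int.mod (h * 26 + PySem.List.pyGetD S j 0) MOD) 0

-- B's loop: for each start i recompute the window hash, set of seen hashes
def altGo (S : List Int) (MOD m : Int) (seen : PySem.Set Int) : List Int → Int
  | [] => -1
  | i :: rest =>
      let h := altHash S MOD m i
      if PySem.Set.contains seen h then i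
      else altGo S MOD m (PySem.Set.add seen h) rest

def check_alt (m : Int) (S : List Int) (MOD : Int) : Int :=
  altGo S MOD m (PySem.Set.ofList [altHash S MOD m 0])
    (PySem.List.pyRange 1 (PySem.List.len S - m + 1) 1)

-- ===== PRECONDITION & SPEC =====
-- Pre_ excludes MOD = 0 (A raises ZeroDivisionError), m > len(S) (A raises IndexError)
-- and m < 0, where A computes aL = 26**m as a FLOAT so its hashes become float arithmetic:
-- an unportable accident of A's implementation (see cites for an excluded input where A returns).
def Pre_check (m : Int) (S : List Int) (MOD : Int) : Prop :=
  MOD ≠ 0 ∧ 0 ≤ m ∧ m ≤ (S.length : Int)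
instance (m : Int) (S : List Int) (MOD : Int) : Decidable (Pre_check m S MOD) := by
  unfold Pre_check; infer_instance
def pvWitness_check : Int × List Int × Int := (2, [1, 2, 1, 2], 7)

def Spec_check (m : Int) (S : List Int) (MOD : Int) (out : Int) : Prop := out = check_alt m S MOD
instance (m : Int) (S : List Int) (MOD : Int) (out : Int) : Decidable (Spec_check m S MOD out) := by
  unfold Spec_check; infer_instance

-- ===== CLAIM (what is proved, stated in full; the proofs are below) =====
def Claim_equal_check : Prop := ∀ (m : Int) (S : List Int) (MOD : Int),
  Dom_check m S MOD → Pre_check m S MOD → Spec_check m S MOD (check m S MOD)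

-- ===== LEMMAS AND PROOFS =====

-- the pure (un-modded) base-26 hash of the window S[i .. i+k)
def pvVal (S : List Int) (i : Int) : Nat → Int
  | 0 => 0
  | k + 1 => pvVal S i k * 26 + PySem.List.pyGetD S (i + k) 0

-- Python's % is congruence-invariant
theorem pvmod_congr (M a b : Int) (h : M ∣ (a - b)) : PySem.Int.mod a M = PySem.Int.mod b M := by
  obtain ⟨k, hk⟩ := h
  have ha : a = b + M * k := by linarith
  subst ha
  simp only [PySem.Int.mod]
  exact Int.add_mul_fmod_self_left b M k

theorem pvmod_zero (M : Int) : PySem.Int.mod 0 M = 0 := by simp [PySem.Int.mod]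

theorem pvmod_sub_self_dvd (M a : Int) : M ∣ (PySem.Int.mod a M - a) := by
  have := PySem.Int.floordiv_mul_add_mod a M
  exact ⟨-(PySem.Int.floordiv a M), by linarith⟩

-- the pure fold over range(i, i+k)
theorem pv_foldl_val (S : List Int) : ∀ (k : Nat) (i a : Int),
    (PySem.List.pyRange i (i + (k : Int)) 1).foldl (fun h j => h * 26 + PySem.List.pyGetD S j 0) a
      = a * 26 ^ k + pvVal S i k := by
  intro k
  induction k with
  | zero => intro i a; simp [PySem.List.pyRange_one_eq_nil (le_refl i), pvVal]
  | succ k ih =>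
      intro i a
      have hb : i + ((k : Int) + 1) = (i + (k : Int)) + 1 := by ring
      have hle : i ≤ i + (k : Int) := by
        have : (0 : Int) ≤ k := Int.natCast_nonneg k
        omega
      rw [show ((k + 1 : Nat) : Int) = (k : Int) + 1 by push_cast; ring, hb,
          PySem.List.pyRange_one_succ_right hle, List.foldl_append, ih]
      simp [pvVal]; ring

-- fold with % at each step = % of the pure fold
theorem pv_foldl_mod (S : List Int) (MOD : Int) : ∀ (l : List Int) (a : Int),
    l.foldl (fun h j => PySem.Int.mod (h * 26 + PySem.List.pyGetD S j 0) MOD) (PySem.Int.mod a MOD)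
      = PySem.Int.mod (l.foldl (fun h j => h * 26 + PySem.List.pyGetD S j 0) a) MOD := by
  intro l
  induction l with
  | nil => intro a; simp
  | cons x l ih =>
      intro a
      simp only [List.foldl_cons]
      have hc : PySem.Int.mod (PySem.Int.mod a MOD * 26 + PySem.List.pyGetD S x 0) MOD
              = PySem.Int.mod (a * 26 + PySem.List.pyGetD S x 0) MOD := by
        apply pvmod_congr
        have := pvmod_sub_self_dvd MOD a
        obtain ⟨k, hk⟩ := this
        exact ⟨k * 26, by linarith⟩
      rw [hc, ← ih]

-- the modded window hash, what both programs actually compare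
def pvW (S : List Int) (MOD m i : Int) : Int := PySem.Int.mod (pvVal S i m.toNat) MOD

theorem pv_inner_eq (S : List Int) (MOD m : Int) (hm : 0 ≤ m) (i : Int) :
    altHash S MOD m i = pvW S MOD m i := by
  unfold altHash
  have hmt : (m.toNat : Int) = m := Int.toNat_of_nonneg hm
  calc (PySem.List.pyRange i (i + m) 1).foldl
          (fun h j => PySem.Int.mod (h * 26 + PySem.List.pyGetD S j 0) MOD) 0
      = (PySem.List.pyRange i (i + (m.toNat : Int)) 1).foldl
          (fun h j => PySem.Int.mod (h * 26 + PySem.List.pyGetD S j 0) MOD) (PySem.Int.mod 0 MOD) := by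
        rw [hmt, pvmod_zero]
    _ = PySem.Int.mod ((PySem.List.pyRange i (i + (m.toNat : Int)) 1).foldl
          (fun h j => h * 26 + PySem.List.pyGetD S j 0) 0) MOD := pv_foldl_mod S MOD _ 0
    _ = pvW S MOD m i := by rw [pv_foldl_val]; simp [pvW]

-- the exact rolling identity on pure hashes
theorem pv_val_shift (S : List Int) : ∀ (k : Nat) (i : Int),
    pvVal S i k * 26 - PySem.List.pyGetD S i 0 * 26 ^ k + PySem.List.pyGetD S (i + k) 0 = pvVal S (i + 1) k := by
  intro k
  induction k with
  | zero => intro i; simp [pvVal]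
  | succ k ih =>
      intro i
      have h1 : i + ((k + 1 : Nat) : Int) = (i + 1) + (k : Int) := by push_cast; ring
      simp only [pvVal, h1]
      rw [← ih i]
      ring

-- A's rolling update lands exactly on the next from-scratch window hash
theorem pv_roll (S : List Int) (MOD m : Int) (hm : 0 ≤ m) (i : Int) :
    PySem.Int.mod (pvW S MOD m (i - 1) * 26 - PySem.List.pyGetD S (i - 1) 0 * PySem.Int.mod (26 ^ m.toNat) MOD
                    + PySem.List.pyGetD S (i + m - 1) 0) MOD
      = pvW S MOD m i := by
  have hmt : (m.toNat : Int) = m := Int.toNat_of_nonneg hm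
  have hidx : i + m - 1 = (i - 1) + (m.toNat : Int) := by omega
  have hcong : PySem.Int.mod
      (pvW S MOD m (i - 1) * 26 - PySem.List.pyGetD S (i - 1) 0 * PySem.Int.mod (26 ^ m.toNat) MOD
        + PySem.List.pyGetD S (i + m - 1) 0) MOD
      = PySem.Int.mod
      (pvVal S (i - 1) m.toNat * 26 - PySem.List.pyGetD S (i - 1) 0 * 26 ^ m.toNat + PySem.List.pyGetD S (i + m - 1) 0) MOD := by
    apply pvmod_congr
    obtain ⟨k₁, hk₁⟩ := pvmod_sub_self_dvd MOD (pvVal S (i - 1) m.toNat)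
    obtain ⟨k₂, hk₂⟩ := pvmod_sub_self_dvd MOD ((26 : Int) ^ m.toNat)
    refine ⟨k₁ * 26 - PySem.List.pyGetD S (i - 1) 0 * k₂, ?_⟩
    simp only [pvW]
    linear_combination 26 * hk₁ - PySem.List.pyGetD S (i - 1) 0 * hk₂
  rw [hcong, hidx, pv_val_shift S m.toNat (i - 1)]
  simp [pvW, sub_add_cancel]

-- A's loop with h = pvW (a-1) behaves like B's loop on the same index range
theorem pv_go_eq (S : List Int) (MOD m : Int) (hm : 0 ≤ m) : ∀ (n : Nat) (a : Int) (dp : PySem.Set Int),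
    checkGo S MOD (PySem.Int.mod (26 ^ m.toNat) MOD) m (pvW S MOD m (a - 1)) dp
        (PySem.List.pyRange a (a + (n : Int)) 1)
      = altGo S MOD m dp (PySem.List.pyRange a (a + (n : Int)) 1) := by
  intro n
  induction n with
  | zero =>
      intro a dp
      rw [PySem.List.pyRange_one_eq_nil (by omega)]
      rfl
  | succ n ih =>
      intro a dp
      have hcons : PySem.List.pyRange a (a + ((n + 1 : Nat) : Int)) 1
          = a :: PySem.List.pyRange (a + 1) (a + ((n + 1 : Nat) : Int)) 1 :=
        PySem.List.pyRange_one_cons (by push_cast; omega)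
      rw [hcons]
      show (if PySem.Set.contains dp (PySem.Int.mod _ MOD) then a else _)
         = (if PySem.Set.contains dp _ then a else _)
      rw [pv_roll S MOD m hm a, pv_inner_eq S MOD m hm a]
      by_cases hmem : PySem.Set.contains dp (pvW S MOD m a) = true
      · rw [if_pos hmem, if_pos hmem]
      · rw [if_neg hmem, if_neg hmem]
        have hrange : PySem.List.pyRange (a + 1) (a + ((n + 1 : Nat) : Int)) 1
            = PySem.List.pyRange (a + 1) ((a + 1) + (n : Int)) 1 := by
          congr 1; push_cast; ring
        have := ih (a + 1) (PySem.Set.add dp (pvW S MOD m a))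
        rw [show a + 1 - 1 = a by ring] at this
        rw [hrange, this]

-- ===== VERDICT (by name: the statement is the Claim_ definition above) =====
theorem check_spec : Claim_equal_check := by
  intro m S MOD _ hpre
  obtain ⟨hMOD, hm, hmlen⟩ := hpre
  unfold Spec_check check check_alt
  simp only [PySem.List.len_eq]
  -- A's initial hash is the from-scratch hash of window 0, i.e. B's whash(0)
  have h0 : (PySem.List.pyRange 0 m 1).foldl
      (fun h i => PySem.Int.mod (h * 26 + PySem.List.pyGetD S i 0) MOD) 0 = pvW S MOD m 0 := by
    have h' := pv_inner_eq S MOD m hm 0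
    unfold altHash at h'
    rw [zero_add] at h'
    exact h'
  rw [h0, pv_inner_eq S MOD m hm 0]
  by_cases hend : (S.length : Int) - m + 1 ≤ 1
  · -- both loops run over the empty range
    rw [PySem.List.pyRange_one_eq_nil hend]
    rfl
  · -- both loops run over range(1, len(S)-m+1); pv_go_eq aligns them index by index
    have hn : (S.length : Int) - m + 1 = 1 + (((S.length : Int) - m).toNat : Int) := by omega
    rw [hn]
    have hgo := pv_go_eq S MOD m hm (((S.length : Int) - m).toNat) 1
      (PySem.Set.ofList [pvW S MOD m 0])
    rw [show (1 : Int) - 1 = 0 from by ring] at hgo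
    exact hgo
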